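-- pv_equiv track=rewrite | github.com/Clean-Code0244/PythonCodeStepByStepSolutions | PythonCodeStepByStep/collections/dict/rarest_age.py | rarest_age
-- ===== SOURCE A (Python) =====
-- def rarest_age(dictionary):
--     if len(dictionary) == 0:
--         return 0
--
--     my_set = set()
--     second_dict = {}
--     for i in dictionary.values():
--         my_set.add(i)
--     for i in my_set:
--         second_dict[i] = 0
--         for j in dictionary.values():
--             while j == i:
--                 second_dict[i] += 1
--                 break
--
--     counter_list = []
--     age_list = []
--     a = find_mins(second_dict)
--     for (i,j) in second_dict.items():
--         if a == j:
--             counter_list.append(j)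
--             age_list.append(i)
--     a = find_min(age_list)
--     return age_list[a]
--
-- def find_mins(dict):
--     list = []
--     for i in dict.values():
--         list.append(i)
--
--     min = list[0]
--     for i in list:
--         if min >= i:
--             min = i
--     return min
--
-- def find_min(list):
--     min = list[0]
--     pos = 0
--     for i in range(len(list)):
--         if min > list[i]:
--             min = list[i]
--             pos = i
--     return pos
-- ===== SOURCE B (Python) =====
-- def rarest_age(dictionary):
--     if not dictionary:
--         return 0
--     counts = {}
--     for v in dictionary.values():
--         counts[v] = counts.get(v, 0) + 1
--     return min(counts, key=lambda age: (counts[age], age))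
-- ===== Notes on version B (the rewrite author's own statement) =====
-- stated objective: simpler
-- what changed: B builds the value-frequency table in one pass with dict.get and returns min(counts, key=lambda age: (counts[age], age)), replacing A's set-plus-nested-counting loop and its three-phase find-min-count / filter / find-min-age selection with a single composite-key min.
import Mathlib
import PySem

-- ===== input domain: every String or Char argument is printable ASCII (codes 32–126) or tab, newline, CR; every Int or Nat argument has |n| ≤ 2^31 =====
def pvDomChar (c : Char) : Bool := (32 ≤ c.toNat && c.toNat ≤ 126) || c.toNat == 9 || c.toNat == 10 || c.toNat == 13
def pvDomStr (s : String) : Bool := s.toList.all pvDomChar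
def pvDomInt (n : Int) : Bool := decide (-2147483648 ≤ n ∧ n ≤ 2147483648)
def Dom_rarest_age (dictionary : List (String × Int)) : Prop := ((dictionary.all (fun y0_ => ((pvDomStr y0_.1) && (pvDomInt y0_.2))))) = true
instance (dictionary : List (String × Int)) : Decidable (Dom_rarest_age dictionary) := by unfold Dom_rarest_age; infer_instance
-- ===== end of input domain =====

-- B replaces A's nested counting loop and three-phase min-count/filter/min-age selection by a
-- one-pass frequency dict and a single composite-key min; objective: simpler.

-- ===== PORT A =====
-- helper find_mins(dict): collect the values, seed with list[0], running min (ties keep the later)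
def pvFindMins (d : PySem.Dict Int Int) : Int :=
  let lst : List Int := d.values
  let m0 := PySem.List.pyGetD lst 0 0
  lst.foldl (fun m i => if m ≥ i then i else m) m0

-- helper find_min(list): position of the first minimum
def pvFindMin (lst : List Int) : Int :=
  let r := (PySem.List.pyRange 0 (lst.length : Int) 1).foldl
    (fun (acc : Int × Int) i =>
      if acc.1 > PySem.List.pyGetD lst i 0 then (PySem.List.pyGetD lst i 0, i) else acc)
    (PySem.List.pyGetD lst 0 0, 0)
  r.2

def rarest_age (dictionary : List (String × Int)) : Int :=
  let d := PySem.Dict.ofList dictionary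
  if d.size = 0 then 0
  else
    let vals := d.values
    let mySet : List Int := PySem.Set.ofList vals   -- my_set = set(); for i in values: my_set.add(i)
    let secondDict : PySem.Dict Int Int :=
      mySet.foldl (fun sd i =>
        -- second_dict[i] = 0; for j in values: while j == i: second_dict[i] += 1; break
        vals.foldl (fun sd j => if j == i then sd.modify i 0 (· + 1) else sd) (sd.insert i 0))
        PySem.Dict.empty
    let a := pvFindMins secondDict
    let p := secondDict.items.foldl
      (fun (acc : List Int × List Int) ij =>
        if a == ij.2 then (acc.1 ++ [ij.2], acc.2 ++ [ij.1]) else acc) ([], [])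
    let ageList := p.2
    let a2 := pvFindMin ageList
    PySem.List.pyGetD ageList a2 0

-- ===== PORT B =====
def rarest_age_alt (dictionary : List (String × Int)) : Int :=
  let d := PySem.Dict.ofList dictionary
  if d.size = 0 then 0
  else
    let counts : PySem.Dict Int Int :=
      d.values.foldl (fun c v => c.insert v (c.getD v 0 + 1)) PySem.Dict.empty
    -- min(counts, key=lambda age: (counts[age], age)); counts is nonempty here, so min2? is some
    (PySem.List.min2? counts.keys (fun age => counts.getD age 0) (fun age => age)).getD 0

-- ===== PRECONDITION & SPEC =====
def Spec_rarest_age (dictionary : List (String × Int)) (out : Int) : Prop := out = rarest_age_alt dictionary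
instance (dictionary : List (String × Int)) (out : Int) : Decidable (Spec_rarest_age dictionary out) := by unfold Spec_rarest_age; infer_instance

-- ===== CLAIM (what is proved, stated in full; the proofs are below) =====
def Claim_equal_rarest_age : Prop := ∀ (dictionary : List (String × Int)), Dom_rarest_age dictionary → Spec_rarest_age dictionary (rarest_age dictionary)

-- ===== LEMMAS AND PROOFS =====

-- A's inner counting loop over key i, started from any dict with i just inserted, is one insert
theorem pv_inner_count (vals' : List Int) (sd : PySem.Dict Int Int) (i c : Int) :
    vals'.foldl (fun sd j => if j == i then sd.modify i 0 (· + 1) else sd) (sd.insert i c)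
      = sd.insert i (c + (vals'.count i : Int)) := by
  induction vals' generalizing c with
  | nil => simp
  | cons j t ih =>
    by_cases hji : j = i
    · subst hji
      rw [List.foldl_cons]
      rw [show (if (j == j) = true then (PySem.Dict.insert sd j c).modify j 0 (· + 1)
            else PySem.Dict.insert sd j c) = sd.insert j (c + 1) from by
        simp [PySem.Dict.modify, PySem.Dict.getD_insert_self, PySem.Dict.insert_insert_self]]
      rw [ih (c + 1)]
      have : (List.count j (j :: t) : Int) = (List.count j t : Int) + 1 := by
        simp
      rw [this]; ring_nf
    · rw [List.foldl_cons]
      rw [show (if (j == i) = true then (PySem.Dict.insert sd i c).modify i 0 (· + 1)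
            else PySem.Dict.insert sd i c) = PySem.Dict.insert sd i c from by simp [hji]]
      rw [ih c]
      have : (List.count i (j :: t) : Int) = (List.count i t : Int) := by
        simp [hji]
      rw [this]

-- running-min loop of find_mins
theorem pv_foldl_min (l : List Int) (m : Int) :
    (l.foldl (fun m i => if m ≥ i then i else m) m) ≤ m ∧
    (∀ y ∈ l, (l.foldl (fun m i => if m ≥ i then i else m) m) ≤ y) ∧
    ((l.foldl (fun m i => if m ≥ i then i else m) m) = m ∨
      (l.foldl (fun m i => if m ≥ i then i else m) m) ∈ l) := by
  induction l generalizing m with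
  | nil => simp
  | cons x t ih =>
    simp only [List.foldl_cons]
    by_cases h : m ≥ x
    · simp only [if_pos h]
      obtain ⟨h1, h2, h3⟩ := ih x
      refine ⟨le_trans h1 h, ?_, ?_⟩
      · intro y hy
        rcases List.mem_cons.mp hy with rfl | hy
        · exact h1
        · exact h2 y hy
      · rcases h3 with h3 | h3
        · exact Or.inr (by simp [h3])
        · exact Or.inr (List.mem_cons_of_mem _ h3)
    · simp only [if_neg h]
      obtain ⟨h1, h2, h3⟩ := ih m
      refine ⟨h1, ?_, ?_⟩
      · intro y hy
        rcases List.mem_cons.mp hy with rfl | hy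
        · exact le_trans h1 (le_of_not_ge h)
        · exact h2 y hy
      · rcases h3 with h3 | h3
        · exact Or.inl h3
        · exact Or.inr (List.mem_cons_of_mem _ h3)

-- the pair-state filter loop of A: its second component ignores the first
theorem pv_pair_snd (a : Int) (items : List (Int × Int)) (acc1 acc2 : List Int) :
    (items.foldl (fun (acc : List Int × List Int) ij =>
        if a == ij.2 then (acc.1 ++ [ij.2], acc.2 ++ [ij.1]) else acc) (acc1, acc2)).2
      = items.foldl (fun l ij => if a == ij.2 then l ++ [ij.1] else l) acc2 := by
  induction items generalizing acc1 acc2 with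
  | nil => rfl
  | cons ij t ih =>
    simp only [List.foldl_cons]
    by_cases h : a == ij.2
    · simp only [h, if_pos]; exact ih _ _
    · simp only [h]; exact ih _ _

-- lexicographic-≤ on (key, value) pairs of Ints is transitive
theorem pv_lex_trans (ka kb kc a b c : Int) (h1 : ka < kb ∨ (ka = kb ∧ a ≤ b))
    (h2 : kb < kc ∨ (kb = kc ∧ b ≤ c)) : ka < kc ∨ (ka = kc ∧ a ≤ c) := by omega

-- invariant of find_min's index loop: the state is (value at pos, pos) and a min of the scanned prefix
theorem pv_findMin_aux (xs : List Int) (hne : xs ≠ []) (n : Nat) (hn : n ≤ xs.length) :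
    (∃ p : Nat, p < xs.length ∧
        ((List.range n).foldl (fun (acc : Int × Int) (k : Nat) =>
          if acc.1 > xs.getD k 0 then (xs.getD k 0, (k : Int)) else acc) (xs.getD 0 0, 0)).2 = (p : Int) ∧
        ((List.range n).foldl (fun (acc : Int × Int) (k : Nat) =>
          if acc.1 > xs.getD k 0 then (xs.getD k 0, (k : Int)) else acc) (xs.getD 0 0, 0)).1 = xs.getD p 0) ∧
    ∀ k < n, ((List.range n).foldl (fun (acc : Int × Int) (k : Nat) =>
          if acc.1 > xs.getD k 0 then (xs.getD k 0, (k : Int)) else acc) (xs.getD 0 0, 0)).1 ≤ xs.getD k 0 := by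
  induction n with
  | zero =>
    refine ⟨⟨0, ?_, rfl, rfl⟩, by omega⟩
    exact List.length_pos_iff.mpr hne
  | succ n ih =>
    obtain ⟨⟨p, hp, h2, h1⟩, hall⟩ := ih (by omega)
    rw [List.range_succ, List.foldl_append, List.foldl_cons, List.foldl_nil]
    by_cases hc : (((List.range n).foldl (fun (acc : Int × Int) (k : Nat) =>
        if acc.1 > xs.getD k 0 then (xs.getD k 0, (k : Int)) else acc) (xs.getD 0 0, 0)).1 > xs.getD n 0)
    · rw [if_pos hc]
      refine ⟨⟨n, by omega, rfl, rfl⟩, ?_⟩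
      intro k hk
      rcases Nat.lt_succ_iff_lt_or_eq.mp hk with hk | rfl
      · exact le_of_lt (lt_of_lt_of_le hc (hall k hk))
      · exact le_refl _
    · rw [if_neg hc]
      refine ⟨⟨p, hp, h2, h1⟩, ?_⟩
      intro k hk
      rcases Nat.lt_succ_iff_lt_or_eq.mp hk with hk | rfl
      · exact hall k hk
      · exact le_of_not_gt hc

-- find_min followed by indexing returns a minimum value of the list
theorem pv_findMin_spec (xs : List Int) (hne : xs ≠ []) :
    PySem.List.pyGetD xs (pvFindMin xs) 0 ∈ xs ∧
    ∀ y ∈ xs, PySem.List.pyGetD xs (pvFindMin xs) 0 ≤ y := by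
  have hfold : pvFindMin xs = ((List.range xs.length).foldl (fun (acc : Int × Int) (k : Nat) =>
      if acc.1 > xs.getD k 0 then (xs.getD k 0, (k : Int)) else acc) (xs.getD 0 0, 0)).2 := by
    unfold pvFindMin
    rw [PySem.List.pyRange_zero_nat, List.foldl_map]
    simp only [PySem.List.pyGetD_natCast, PySem.List.pyGetD_zero]
  obtain ⟨⟨p, hp, h2, h1⟩, hall⟩ := pv_findMin_aux xs hne xs.length (le_refl _)
  have hgd : ∀ (q : Nat) (hq : q < xs.length), xs.getD q 0 = xs[q] := by
    intro q hq
    simp [List.getD_eq_getElem?_getD, List.getElem?_eq_getElem hq]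
  have hval : PySem.List.pyGetD xs (pvFindMin xs) 0 = xs.getD p 0 := by
    rw [hfold, h2, PySem.List.pyGetD_natCast, ← h1, h1]
  constructor
  · rw [hval, hgd p hp]
    exact List.getElem_mem hp
  · intro y hy
    obtain ⟨k, hk, rfl⟩ := List.mem_iff_getElem.mp hy
    rw [hval, ← hgd k hk, ← h1]
    exact hall k hk

-- min(xs, key=lambda x: (k1(x), x)) on a nonempty list: the lexicographic minimum
theorem pv_min2_spec (k1 : Int → Int) (t : List Int) : ∀ m0 : Int, ∃ m,
    PySem.List.min2? (m0 :: t) k1 (fun x => x) = some m ∧ m ∈ m0 :: t ∧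
      ∀ y ∈ m0 :: t, k1 m < k1 y ∨ (k1 m = k1 y ∧ m ≤ y) := by
  induction t with
  | nil =>
    intro m0
    refine ⟨m0, rfl, List.mem_cons_self, ?_⟩
    intro y hy
    rcases List.mem_cons.mp hy with rfl | hy
    · exact Or.inr ⟨rfl, le_refl _⟩
    · simp at hy
  | cons x t ih =>
    intro m0
    by_cases hc : k1 x < k1 m0 ∨ (¬ k1 m0 < k1 x ∧ x < m0)
    · obtain ⟨m, hm, hmem, hall⟩ := ih x
      have hred : PySem.List.min2? (m0 :: x :: t) k1 (fun x => x)
          = PySem.List.min2? (x :: t) k1 (fun x => x) := by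
        simp only [PySem.List.min2?, List.foldl_cons]
        rw [if_pos]
        simp only [Bool.or_eq_true, Bool.and_eq_true, Bool.not_eq_true', decide_eq_true_eq,
          decide_eq_false_iff_not]
        exact hc
      have hmx : k1 m < k1 x ∨ (k1 m = k1 x ∧ m ≤ x) := hall x List.mem_cons_self
      refine ⟨m, hred ▸ hm, ?_, ?_⟩
      · exact List.mem_cons_of_mem _ hmem
      · intro y hy
        rcases List.mem_cons.mp hy with rfl | hy
        · exact pv_lex_trans _ _ _ _ _ _ hmx (by omega)
        · exact hall y hy
    · obtain ⟨m, hm, hmem, hall⟩ := ih m0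
      have hred : PySem.List.min2? (m0 :: x :: t) k1 (fun x => x)
          = PySem.List.min2? (m0 :: t) k1 (fun x => x) := by
        simp only [PySem.List.min2?, List.foldl_cons]
        rw [if_neg]
        simp only [Bool.or_eq_true, Bool.and_eq_true, Bool.not_eq_true', decide_eq_true_eq,
          decide_eq_false_iff_not]
        exact hc
      have hmm0 : k1 m < k1 m0 ∨ (k1 m = k1 m0 ∧ m ≤ m0) := hall m0 List.mem_cons_self
      refine ⟨m, hred ▸ hm, ?_, ?_⟩
      · rcases List.mem_cons.mp hmem with rfl | hmem
        · exact List.mem_cons_self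
        · exact List.mem_cons_of_mem _ (List.mem_cons_of_mem _ hmem)
      · intro y hy
        rcases List.mem_cons.mp hy with rfl | hy
        · exact hall y List.mem_cons_self
        · rcases List.mem_cons.mp hy with rfl | hy
          · exact pv_lex_trans _ _ _ _ _ _ hmm0 (by omega)
          · exact hall y (List.mem_cons_of_mem _ hy)

-- find_mins: the running min over values seeded with the first value is a minimum of the list
theorem pv_findMins_spec (lst : List Int) (hne : lst ≠ []) :
    (lst.foldl (fun m i => if m ≥ i then i else m) (PySem.List.pyGetD lst 0 0)) ∈ lst ∧
    ∀ y ∈ lst, (lst.foldl (fun m i => if m ≥ i then i else m) (PySem.List.pyGetD lst 0 0)) ≤ y := by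
  obtain ⟨h1, h2, h3⟩ := pv_foldl_min lst (PySem.List.pyGetD lst 0 0)
  have hm0 : PySem.List.pyGetD lst 0 0 ∈ lst := by
    rw [PySem.List.pyGetD_zero]
    cases lst with
    | nil => exact absurd rfl hne
    | cons c cs => simp [List.getD]
  refine ⟨?_, h2⟩
  rcases h3 with h3 | h3
  · rw [h3]; exact hm0
  · exact h3

-- the whole else-branch of A equals the whole else-branch of B, over the shared values list
theorem pv_core (vals : List Int) (hne : vals ≠ []) :
    (let mySet : List Int := PySem.Set.ofList vals
     let secondDict : PySem.Dict Int Int :=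
       mySet.foldl (fun sd i =>
         vals.foldl (fun sd j => if j == i then sd.modify i 0 (· + 1) else sd) (sd.insert i 0))
         PySem.Dict.empty
     let a := pvFindMins secondDict
     let p := secondDict.items.foldl
       (fun (acc : List Int × List Int) ij =>
         if a == ij.2 then (acc.1 ++ [ij.2], acc.2 ++ [ij.1]) else acc) ([], [])
     PySem.List.pyGetD p.2 (pvFindMin p.2) 0)
    = (let counts : PySem.Dict Int Int :=
         vals.foldl (fun c v => c.insert v (c.getD v 0 + 1)) PySem.Dict.empty
       (PySem.List.min2? counts.keys (fun age => counts.getD age 0) (fun age => age)).getD 0) := by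
  dsimp only
  have hstep : (fun (sd : PySem.Dict Int Int) (i : Int) =>
      vals.foldl (fun sd j => if j == i then sd.modify i 0 (· + 1) else sd) (sd.insert i 0))
      = (fun sd i => sd.insert i ((vals.count i : Int))) := by
    funext sd i
    have h := pv_inner_count vals sd i 0
    simpa using h
  rw [hstep]
  set K : List Int := PySem.Set.ofList vals with hK
  set sd : PySem.Dict Int Int :=
    K.foldl (fun sd i => sd.insert i ((vals.count i : Int))) PySem.Dict.empty with hsd
  have hitems : sd.items = K.map (fun i => (i, (vals.count i : Int))) := by
    rw [hsd]
    have h1 : ∀ a ∈ K, (PySem.Dict.empty : PySem.Dict Int Int).contains ((fun i => i) a) = false := by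
      intro a _
      simp [PySem.Dict.contains, PySem.Dict.empty]
    have h2 : (K.map (fun i => i)).Nodup := by
      rw [hK]
      simp [PySem.Set.nodup_ofList]
    have h := PySem.Dict.items_foldl_insert_fresh K (fun i => i) (fun i => ((vals.count i : Int)))
      PySem.Dict.empty h1 h2
    simpa [PySem.Dict.items, PySem.Dict.empty] using h
  have hvalues : sd.values = K.map (fun i => (vals.count i : Int)) := by
    show sd.items.map (·.2) = _
    rw [hitems, List.map_map]
    rfl
  have hKne : K ≠ [] := by
    cases vals with
    | nil => exact absurd rfl hne
    | cons v vs =>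
      exact List.ne_nil_of_mem ((PySem.Set.mem_ofList _ _).mpr List.mem_cons_self)
  have hvalsNe : sd.values ≠ [] := by
    rw [hvalues]
    simpa using hKne
  -- the minimum count a
  have haeq : pvFindMins sd
      = sd.values.foldl (fun m i => if m ≥ i then i else m) (PySem.List.pyGetD sd.values 0 0) := rfl
  obtain ⟨haMem, haMin⟩ := pv_findMins_spec sd.values hvalsNe
  rw [← haeq] at haMem haMin
  obtain ⟨i0, hi0K, hi0a⟩ := List.mem_map.mp (hvalues ▸ haMem)
  have haMinK : ∀ i ∈ K, pvFindMins sd ≤ (vals.count i : Int) := by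
    intro i hi
    exact haMin _ (hvalues ▸ List.mem_map_of_mem hi)
  -- the age list
  rw [pv_pair_snd (pvFindMins sd) sd.items [] [], PySem.List.foldl_append_if, hitems,
    List.filter_map, List.map_map]
  have hcomp : ((fun ij : Int × Int => pvFindMins sd == ij.2) ∘ fun i => (i, (vals.count i : Int)))
      = fun i => pvFindMins sd == (vals.count i : Int) := rfl
  have hfst : ((fun ij : Int × Int => ij.1) ∘ fun i => (i, (vals.count i : Int)))
      = fun i : Int => i := rfl
  rw [hcomp, hfst, List.map_id', List.nil_append]
  set ageL : List Int := K.filter (fun i => pvFindMins sd == (vals.count i : Int)) with hage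
  have hageNe : ageL ≠ [] := by
    refine List.ne_nil_of_mem (a := i0) (List.mem_filter.mpr ⟨hi0K, ?_⟩)
    simp [hi0a]
  obtain ⟨hmemA, hminA⟩ := pv_findMin_spec ageL hageNe
  obtain ⟨ha0K, ha0cnt⟩ := List.mem_filter.mp hmemA
  have ha0cnt' : (vals.count (PySem.List.pyGetD ageL (pvFindMin ageL) 0) : Int) = pvFindMins sd := by
    have := of_decide_eq_true ha0cnt
    omega
  -- B's counter
  set counts : PySem.Dict Int Int :=
    vals.foldl (fun c v => c.insert v (c.getD v 0 + 1)) PySem.Dict.empty with hcounts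
  have hkeys : counts.keys = K := by
    rw [hcounts, PySem.Dict.keys_foldl_insert vals (fun d x => d.getD x 0 + 1) PySem.Dict.empty]
    have : (PySem.Dict.empty : PySem.Dict Int Int).keys = [] := by
      simp [PySem.Dict.keys, PySem.Dict.empty]
    rw [this, PySem.Set.update_nil_left, hK]
  have hgetD : ∀ v : Int, counts.getD v 0 = (vals.count v : Int) := by
    intro v
    rw [hcounts, PySem.Dict.getD_foldl_insert_add_one vals PySem.Dict.empty v]
    have : (PySem.Dict.empty : PySem.Dict Int Int).getD v 0 = 0 := by
      simp [PySem.Dict.getD, PySem.Dict.get?, PySem.Dict.empty]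
    rw [this, zero_add]
  obtain ⟨k0, ks, hKcons⟩ := List.exists_cons_of_ne_nil hKne
  rw [hkeys, hKcons]
  obtain ⟨b, hb, hbMem, hbAll⟩ := pv_min2_spec (fun age => counts.getD age 0) ks k0
  rw [hb]
  show PySem.List.pyGetD ageL (pvFindMin ageL) 0 = b
  rw [← hKcons] at hbMem hbAll
  simp only [hgetD] at hbAll
  -- glue
  set a0 : Int := PySem.List.pyGetD ageL (pvFindMin ageL) 0 with ha0
  have hble : (vals.count b : Int) ≤ (vals.count a0 : Int) ∧ b ≤ a0 := by
    have h1 := hbAll a0 ha0K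
    have h2 := haMinK b hbMem
    rw [ha0cnt'] at h1 ⊢
    omega
  have hbInAge : b ∈ ageL := by
    rw [hage]
    refine List.mem_filter.mpr ⟨hbMem, ?_⟩
    have h2 := haMinK b hbMem
    have h1 := hbAll a0 ha0K
    rw [ha0cnt'] at h1
    have : pvFindMins sd = (vals.count b : Int) := by omega
    simp [← this]
  exact le_antisymm (hminA b hbInAge) hble.2

-- ===== VERDICT (by name: the statement is the Claim_ definition above) =====
theorem rarest_age_spec : Claim_equal_rarest_age := by
  intro dictionary _
  show rarest_age dictionary = rarest_age_alt dictionary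
  unfold rarest_age rarest_age_alt
  dsimp only
  by_cases hsz : (PySem.Dict.ofList dictionary).size = 0
  · rw [if_pos hsz, if_pos hsz]
  · rw [if_neg hsz, if_neg hsz]
    have hne : (PySem.Dict.ofList dictionary).values ≠ [] := by
      intro h
      apply hsz
      have : (PySem.Dict.ofList dictionary).items = [] := by
        have := congrArg List.length h
        simpa [PySem.Dict.values] using this
      show (PySem.Dict.ofList dictionary).items.length = 0
      rw [this]
      rfl
    exact pv_core (PySem.Dict.ofList dictionary).values hne
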